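-- pv_equiv track=rewrite | github.com/LiquidGunay/semantic-entropy-probe-comparison | scripts/01_generate_with_vllm.py | _find_last_subseq
-- ===== SOURCE A (Python) =====
-- from typing import Dict, List
--
-- def _find_last_subseq(seq: List[int], subseq: List[int], start: int = 0) -> int:
--     """Return last index where subseq appears in seq[start:], or -1."""
--     last = -1
--     if not subseq:
--         return last
--     for i in range(start, len(seq) - len(subseq) + 1):
--         if seq[i : i + len(subseq)] == subseq:
--             last = i
--     return last
-- ===== SOURCE B (Python) =====
-- from typing import List
--
-- def _find_last_subseq(seq: List[int], subseq: List[int], start: int = 0) -> int: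
--     """Return last index where subseq appears in seq[start:], or -1."""
--     if not subseq:
--         return -1
--     lo = max(start, 0)
--     i = len(seq) - len(subseq)
--     while i >= lo:
--         if seq[i : i + len(subseq)] == subseq:
--             return i
--         i -= 1
--     return -1
-- ===== Notes on version B (the rewrite author's own statement) =====
-- stated objective: alternative
-- what changed: A scans every window forward from start remembering the last match; B scans backward from the last possible window position and returns at the first (rightmost) match, clamping a negative start to 0.
import Mathlib
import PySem

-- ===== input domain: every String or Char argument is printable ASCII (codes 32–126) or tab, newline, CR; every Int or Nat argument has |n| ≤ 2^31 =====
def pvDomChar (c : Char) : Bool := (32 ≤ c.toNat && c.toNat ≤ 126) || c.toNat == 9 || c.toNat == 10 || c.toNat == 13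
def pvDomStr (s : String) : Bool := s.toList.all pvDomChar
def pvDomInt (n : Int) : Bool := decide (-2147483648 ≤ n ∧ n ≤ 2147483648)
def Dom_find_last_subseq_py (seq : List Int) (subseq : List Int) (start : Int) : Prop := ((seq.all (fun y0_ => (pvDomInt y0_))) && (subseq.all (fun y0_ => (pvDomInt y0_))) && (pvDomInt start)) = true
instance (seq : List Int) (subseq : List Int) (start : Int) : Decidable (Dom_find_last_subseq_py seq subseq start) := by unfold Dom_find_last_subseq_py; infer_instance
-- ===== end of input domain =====

-- B replaces A's full forward scan (which remembers the last match) by a backward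
-- scan from the last possible position that returns at the first match found
-- (objective: alternative traversal with early exit; same worst case).

-- ===== PORT A =====
-- literal transliteration of A: last = -1; early return on empty subseq;
-- for i in range(start, len(seq)-len(subseq)+1): if seq[i:i+len(subseq)] == subseq: last = i
def find_last_subseq_py (seq : List Int) (subseq : List Int) (start : Int) : Int :=
  let last : Int := -1
  if subseq = [] then last
  else
    (PySem.List.pyRange start ((seq.length : Int) - (subseq.length : Int) + 1) 1).foldl
      (fun last i =>
        if PySem.List.slice seq (some i) (some (i + (subseq.length : Int))) = subseq then i
        else last)
      last

-- ===== PORT B =====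
-- B's while-loop: i runs from len(seq)-len(subseq) down to lo = max(start, 0),
-- returning the first (i.e. rightmost) match, else -1.
def altScan (seq : List Int) (subseq : List Int) (lo : Int) (i : Int) : Int :=
  if i < lo then -1
  else if PySem.List.slice seq (some i) (some (i + (subseq.length : Int))) = subseq then i
  else altScan seq subseq lo (i - 1)
termination_by (i - lo + 1).toNat
decreasing_by simp_wf; omega

def find_last_subseq_py_alt (seq : List Int) (subseq : List Int) (start : Int) : Int :=
  if subseq = [] then -1
  else altScan seq subseq (max start 0) ((seq.length : Int) - (subseq.length : Int))

-- ===== PRECONDITION & SPEC =====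
def Spec_find_last_subseq_py (seq : List Int) (subseq : List Int) (start : Int) (out : Int) : Prop := out = find_last_subseq_py_alt seq subseq start
instance (seq : List Int) (subseq : List Int) (start : Int) (out : Int) : Decidable (Spec_find_last_subseq_py seq subseq start out) := by unfold Spec_find_last_subseq_py; infer_instance

-- ===== CLAIM (what is proved, stated in full; the proofs are below) =====
def Claim_equal_find_last_subseq_py : Prop := ∀ (seq : List Int) (subseq : List Int) (start : Int), Dom_find_last_subseq_py seq subseq start → Spec_find_last_subseq_py seq subseq start (find_last_subseq_py seq subseq start)

-- ===== LEMMAS AND PROOFS =====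

-- the match predicate both programs test
def pvMatch (seq : List Int) (subseq : List Int) (j : Int) : Bool :=
  decide (PySem.List.slice seq (some j) (some (j + (subseq.length : Int))) = subseq)

-- A's fold keeps the LAST index satisfying the test
theorem foldl_last (seq subseq : List Int) (l : List Int) (c : Int) :
    l.foldl
      (fun last i =>
        if PySem.List.slice seq (some i) (some (i + (subseq.length : Int))) = subseq then i
        else last) c
      = (l.filter (pvMatch seq subseq)).getLastD c := by
  induction l generalizing c with
  | nil => rfl
  | cons x t ih =>
    rw [List.foldl_cons, List.filter_cons]
    by_cases hx : PySem.List.slice seq (some x) (some (x + (subseq.length : Int))) = subseq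
    · rw [if_pos hx, ih, if_pos (show pvMatch seq subseq x = true from by simp [pvMatch, hx]),
        List.getLastD_cons]
    · rw [if_neg hx, ih, if_neg (show ¬ pvMatch seq subseq x = true from by simp [pvMatch, hx])]

-- B's backward scan returns the last index of [lo, i+1) satisfying the test
theorem altScan_eq (seq subseq : List Int) (lo i : Int) :
    altScan seq subseq lo i
      = ((PySem.List.pyRange lo (i + 1) 1).filter (pvMatch seq subseq)).getLastD (-1) := by
  by_cases h : i < lo
  · rw [altScan]
    simp [h, PySem.List.pyRange_one_eq_nil (by omega : i + 1 ≤ lo)]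
  · rw [altScan]
    rw [PySem.List.pyRange_one_succ_right (by omega : lo ≤ i), List.filter_append]
    by_cases hm : PySem.List.slice seq (some i) (some (i + (subseq.length : Int))) = subseq
    · simp [h, hm, pvMatch]
    · have ih := altScan_eq seq subseq lo (i - 1)
      rw [show i - 1 + 1 = i from by ring] at ih
      simp [h, hm, pvMatch, ih]
termination_by (i - lo + 1).toNat
decreasing_by simp_wf; omega

-- if seq is shorter than subseq, no slice of seq can equal subseq
theorem no_match_short (seq subseq : List Int) (h : (seq.length : Int) < (subseq.length : Int))
    (j : Int) : pvMatch seq subseq j = false := by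
  simp only [pvMatch, decide_eq_false_iff_not]
  intro he
  have hl := PySem.List.length_slice seq j (j + (subseq.length : Int))
  rw [he] at hl
  have h1 := PySem.List.clampIdx_le seq.length (j + (subseq.length : Int))
  omega

-- a match at a negative index i is the same list as the match at len(seq)+i,
-- which lies within [0, len(seq)-len(subseq)+1)
theorem shadow (seq subseq : List Int) (hne : subseq ≠ []) (i : Int) (hi : i < 0)
    (hm : pvMatch seq subseq i = true) :
    0 ≤ (seq.length : Int) + i ∧
    (seq.length : Int) + i < (seq.length : Int) - (subseq.length : Int) + 1 ∧
    pvMatch seq subseq ((seq.length : Int) + i) = true := by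
  have hm0 : 0 < subseq.length := List.length_pos_of_ne_nil hne
  simp only [pvMatch, decide_eq_true_eq] at hm
  have hl := PySem.List.length_slice seq i (i + (subseq.length : Int))
  rw [hm] at hl
  simp only [PySem.List.clampIdx] at hl
  -- derive the arithmetic shape: i + m < 0 and 0 ≤ len + i
  have hstop : i + (subseq.length : Int) < 0 := by
    by_contra hge
    rw [not_lt] at hge
    split_ifs at hl <;> omega
  have hlo : 0 ≤ (seq.length : Int) + i := by
    split_ifs at hl <;> omega
  refine ⟨hlo, by omega, ?_⟩
  simp only [pvMatch, decide_eq_true_eq]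
  rw [PySem.List.slice_toNat seq (a := (seq.length : Int) + i) (b := (seq.length : Int) + i + (subseq.length : Int)) (by omega) (by omega)]
  simp only [PySem.List.slice, PySem.List.clampIdx] at hm
  rw [if_pos hi, if_neg (by omega : ¬ (seq.length : Int) + i < 0),
      if_pos hstop, if_neg (by omega : ¬ (seq.length : Int) + (i + (subseq.length : Int)) < 0)] at hm
  rw [show ((seq.length : Int) + i + (subseq.length : Int)).toNat - ((seq.length : Int) + i).toNat
        = ((seq.length : Int) + (i + (subseq.length : Int))).toNat - ((seq.length : Int) + i).toNat
      from by omega]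
  exact hm

theorem filter_getLastD_drop_neg (seq subseq : List Int) (hne : subseq ≠ [])
    (start : Int) (hstart : start < 0) :
    ((PySem.List.pyRange start ((seq.length : Int) - (subseq.length : Int) + 1) 1).filter
        (pvMatch seq subseq)).getLastD (-1)
      = ((PySem.List.pyRange 0 ((seq.length : Int) - (subseq.length : Int) + 1) 1).filter
        (pvMatch seq subseq)).getLastD (-1) := by
  set hi : Int := (seq.length : Int) - (subseq.length : Int) + 1 with hhi
  by_cases hpos : hi ≤ 0
  · -- seq shorter than subseq: no match anywhere, both filters are empty
    have hshort : (seq.length : Int) < (subseq.length : Int) := by omega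
    have hall : ∀ l : List Int, l.filter (pvMatch seq subseq) = [] := by
      intro l
      apply List.filter_eq_nil_iff.mpr
      intro j _
      simp [no_match_short seq subseq hshort j]
    rw [hall, hall]
  · rw [not_le] at hpos
    rw [PySem.List.pyRange_one_append start 0 hi (by omega) (by omega), List.filter_append]
    set u := (PySem.List.pyRange start 0 1).filter (pvMatch seq subseq) with hu
    set v := (PySem.List.pyRange 0 hi 1).filter (pvMatch seq subseq) with hv
    rcases List.eq_nil_or_concat' u with h0 | ⟨u', j, h0⟩
    · rw [h0, List.nil_append]
    · -- some negative index matches; its shadow at len+j makes v nonempty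
      have hjmem : j ∈ u := by rw [h0]; exact List.mem_concat_self
      rw [hu, List.mem_filter] at hjmem
      obtain ⟨hjr, hjp⟩ := hjmem
      rw [PySem.List.mem_pyRange_one] at hjr
      obtain ⟨_, hsh1, hsh2⟩ := shadow seq subseq hne j hjr.2 hjp
      have hvne : v ≠ [] := by
        intro hvnil
        have : (seq.length : Int) + j ∈ v := by
          rw [hv, List.mem_filter, PySem.List.mem_pyRange_one]
          exact ⟨⟨by omega, by omega⟩, hsh2⟩
        rw [hvnil] at this
        exact absurd this (List.not_mem_nil)
      rcases List.eq_nil_or_concat' v with hvnil | ⟨v', y, hvy⟩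
      · exact absurd hvnil hvne
      · rw [hvy, ← List.append_assoc]
        rw [List.getLastD_concat, List.getLastD_concat]

-- ===== VERDICT (by name: the statement is the Claim_ definition above) =====
theorem find_last_subseq_py_spec : Claim_equal_find_last_subseq_py := by
  intro seq subseq start _
  unfold Spec_find_last_subseq_py find_last_subseq_py find_last_subseq_py_alt
  by_cases hne : subseq = []
  · simp [hne]
  · simp only [hne, if_false]
    rw [foldl_last, altScan_eq]
    rw [show (seq.length : Int) - (subseq.length : Int) + 1 = ((seq.length : Int) - (subseq.length : Int)) + 1 from rfl]
    by_cases hs : 0 ≤ start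
    · rw [max_eq_left (by omega : (0:Int) ≤ start)]
    · rw [max_eq_right (by omega : start ≤ (0:Int))]
      exact filter_getLastD_drop_neg seq subseq hne start (by omega)
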